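-- pv_equiv track=rewrite | github.com/daniel-reich/ubiquitous-fiesta | YzcnFjMEKQfyHAg6B_11.py | simon_says
-- ===== SOURCE A (Python) =====
-- def simon_says(lst1, lst2):
--   for x in range(len(lst1)):
--     try:
--       if lst1[x] == lst2[x+1]:
--         pass
--       else:
--         return False
--     except:
--       pass
--   return True
-- ===== SOURCE B (Python) =====
-- def simon_says(lst1, lst2):
--   n = max(0, min(len(lst1), len(lst2) - 1))
--   return lst1[:n] == lst2[1:n+1]
-- ===== Notes on version B (the rewrite author's own statement) =====
-- stated objective: alternative
-- what changed: Instead of an elementwise loop comparing lst1[x] to lst2[x+1] with try/except, B computes the overlap length n = max(0, min(len(lst1), len(lst2)-1)) once and compares the two slices lst1[:n] and lst2[1:n+1] wholesale as lists.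
import Mathlib
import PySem

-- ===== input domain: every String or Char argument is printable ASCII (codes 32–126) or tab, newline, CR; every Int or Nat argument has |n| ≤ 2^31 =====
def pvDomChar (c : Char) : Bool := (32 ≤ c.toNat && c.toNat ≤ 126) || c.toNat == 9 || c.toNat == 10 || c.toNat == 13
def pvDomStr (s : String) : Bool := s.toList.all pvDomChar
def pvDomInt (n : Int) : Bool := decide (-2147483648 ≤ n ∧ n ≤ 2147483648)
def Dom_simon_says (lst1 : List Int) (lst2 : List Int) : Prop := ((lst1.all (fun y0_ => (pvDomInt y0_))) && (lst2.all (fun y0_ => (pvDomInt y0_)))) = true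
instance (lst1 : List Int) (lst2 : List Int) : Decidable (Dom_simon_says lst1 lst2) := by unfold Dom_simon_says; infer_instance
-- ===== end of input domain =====

-- B replaces A's elementwise index loop with a computed overlap length n and one wholesale slice comparison lst1[:n] == lst2[1:n+1] (alternative decomposition, same cost).

-- ===== PORT A =====
-- the for-loop over range(len(lst1)); try/except: an out-of-range access (pyGet? = none) is 'pass'
def simonLoop (lst1 : List Int) (lst2 : List Int) : List Int → Bool
  | [] => true
  | x :: rest =>
    match PySem.List.pyGet? lst1 x, PySem.List.pyGet? lst2 (x + 1) with
    | some a, some b => if a == b then simonLoop lst1 lst2 rest else false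
    | _, _ => simonLoop lst1 lst2 rest

def simon_says (lst1 : List Int) (lst2 : List Int) : Bool :=
  simonLoop lst1 lst2 (PySem.List.pyRange 0 lst1.length 1)

-- ===== PORT B =====
def simon_says_alt (lst1 : List Int) (lst2 : List Int) : Bool :=
  let n : Int := max 0 (min (lst1.length : Int) ((lst2.length : Int) - 1))
  PySem.List.slice lst1 none (some n) == PySem.List.slice lst2 (some 1) (some (n + 1))

-- ===== PRECONDITION & SPEC =====
def Spec_simon_says (lst1 : List Int) (lst2 : List Int) (out : Bool) : Prop := out = simon_says_alt lst1 lst2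
instance (lst1 : List Int) (lst2 : List Int) (out : Bool) : Decidable (Spec_simon_says lst1 lst2 out) := by unfold Spec_simon_says; infer_instance

-- ===== CLAIM (what is proved, stated in full; the proofs are below) =====
def Claim_equal_simon_says : Prop := ∀ (lst1 : List Int) (lst2 : List Int), Dom_simon_says lst1 lst2 → Spec_simon_says lst1 lst2 (simon_says lst1 lst2)

-- ===== LEMMAS AND PROOFS =====

lemma simonLoop_range (lst1 lst2 : List Int) :
    ∀ (k : Nat), simonLoop lst1 lst2 (PySem.List.pyRange (k : Int) lst1.length 1)
      = ((lst1.drop k).zip (lst2.drop (k + 1))).all (fun p => p.1 == p.2) := by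
  intro k
  induction hm : lst1.length - k using Nat.strong_induction_on generalizing k with
  | _ m ih =>
  by_cases hk : k < lst1.length
  · have hcons : PySem.List.pyRange (k : Int) lst1.length 1
        = (k : Int) :: PySem.List.pyRange ((k : Int) + 1) lst1.length 1 := by
      exact PySem.List.pyRange_one_cons (by exact_mod_cast hk)
    rw [hcons]
    have hd1 : lst1.drop k = lst1[k] :: lst1.drop (k + 1) :=
      List.drop_eq_getElem_cons hk
    have hget1 : PySem.List.pyGet? lst1 (k : Int) = some lst1[k] :=
      PySem.List.pyGet?_ofNat _ _ hk
    have hrec : simonLoop lst1 lst2 (PySem.List.pyRange ((k : Int) + 1) lst1.length 1)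
        = ((lst1.drop (k + 1)).zip (lst2.drop (k + 2))).all (fun p => p.1 == p.2) := by
      have := ih (lst1.length - (k + 1)) (by omega) (k + 1) rfl
      simpa using this
    by_cases h2 : k + 1 < lst2.length
    · have hd2 : lst2.drop (k + 1) = lst2[k + 1] :: lst2.drop (k + 2) :=
        List.drop_eq_getElem_cons h2
      have hget2 : PySem.List.pyGet? lst2 ((k : Int) + 1) = some lst2[k + 1] := by
        have : ((k : Int) + 1) = ((k + 1 : Nat) : Int) := by push_cast; ring
        rw [this]
        exact PySem.List.pyGet?_ofNat _ _ h2
      simp only [simonLoop, hget1, hget2, hrec, hd1, hd2, List.zip_cons_cons, List.all_cons]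
      by_cases he : lst1[k] == lst2[k + 1] <;> simp [he]
    · have hget2 : PySem.List.pyGet? lst2 ((k : Int) + 1) = none := by
        rw [show ((k : Int) + 1) = ((k + 1 : Nat) : Int) by push_cast; ring]
        rw [PySem.List.pyGet?_natCast]
        exact List.getElem?_eq_none (by omega)
      have hd2 : lst2.drop (k + 1) = [] := List.drop_eq_nil_of_le (by omega)
      have hd2' : lst2.drop (k + 2) = [] := List.drop_eq_nil_of_le (by omega)
      simp only [simonLoop, hget1, hget2, hrec, hd1, hd2, hd2', List.zip_nil_right]
  · have hr : PySem.List.pyRange (k : Int) lst1.length 1 = [] := by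
      rw [PySem.List.pyRange_one]
      have : ((lst1.length : Int) - k).toNat = 0 := by omega
      simp [this]
    have hd : lst1.drop k = [] := List.drop_eq_nil_of_le (by omega)
    simp [hr, hd, simonLoop]

-- pairwise zip-all equals wholesale equality of the mutually-truncated prefixes
lemma zip_all_eq_take (a b : List Int) :
    (a.zip b).all (fun p => p.1 == p.2) = (a.take b.length == b.take a.length) := by
  induction a generalizing b with
  | nil => simp
  | cons x xs ih =>
    cases b with
    | nil => simp
    | cons y ys =>
      simp only [List.zip_cons_cons, List.all_cons, List.length_cons, List.take_succ_cons]
      rw [ih ys]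
      by_cases he : x == y
      · have : x = y := by simpa using he
        simp [this]
      · have : ¬ x = y := by simpa using he
        simp [he, this]

theorem simon_says_spec : Claim_equal_simon_says := by
  intro lst1 lst2 _
  unfold Spec_simon_says simon_says simon_says_alt
  dsimp only
  have h := simonLoop_range lst1 lst2 0
  simp only [Nat.cast_zero, List.drop_zero, Nat.zero_add] at h
  rw [h, zip_all_eq_take]
  set t := lst2.drop 1 with ht
  set n : Int := max 0 (min (lst1.length : Int) ((lst2.length : Int) - 1)) with hn
  have hn0 : 0 ≤ n := le_max_left _ _
  have h1 : PySem.List.slice lst1 none (some n) = lst1.take n.toNat :=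
    PySem.List.slice_to _ hn0
  have h2 : PySem.List.slice lst2 (some 1) (some (n + 1))
      = (lst2.drop (1 : Int).toNat).take ((n + 1).toNat - (1 : Int).toNat) :=
    PySem.List.slice_toNat _ (by norm_num) (by omega)
  rw [h1, h2]
  have htlen : t.length = lst2.length - 1 := by simp [ht]
  have e1 : lst1.take t.length = lst1.take n.toNat := by
    rw [List.take_eq_take_iff]; omega
  have e2 : t.take lst1.length = t.take ((n + 1).toNat - 1) := by
    rw [List.take_eq_take_iff]; omega
  have : (lst2.drop (1 : Int).toNat) = t := by norm_num [ht]
  rw [this, e1, e2]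
  norm_num
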